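-- pv_equiv track=rewrite | github.com/steven-tt/Project-Euler | Problem 37(Done).py | trunc
-- ===== SOURCE A (Python) =====
-- def trunc(num):
--     '''
--     Input: integer
--     Output: boolean
--     Takes in an integer and left and right truncates it eg right 3797,379,37,3,
--     and tests to see if all the numbers are prime.
--     '''
--     # This is the left and right truncations done using list comprehension got really ugly
--     #[int(str(num)[0:len(str(num))-i]) for i in range(len(str(num)))] + [int(str(num)[i:len(str(num))]) for i in range(len(str(num)))]
--     num = str(num)
--     list_nums = []
--     #Does left and right truncations and adds them to list
--     for i in range(len(num)):
--         list_nums.append(num[:len(num)-i])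
--         list_nums.append(num[i:len(num)])
--     #Turns all the nums to integers
--     for i in range(len(list_nums)):
--         list_nums[i] = int(list_nums[i])
--     #Return the unique objects in the list
--     return set(list_nums)
-- ===== SOURCE B (Python) =====
-- def trunc(num):
--     # Integer arithmetic instead of string slicing: right-truncations by integer
--     # division with powers of ten, left-truncations by modulus with powers of ten.
--     L, t = 1, num
--     while t >= 10:
--         t //= 10
--         L += 1
--     res = set()
--     p = 10 ** L
--     for i in range(L):
--         res.add(num // 10 ** i)
--         res.add(num % (p // 10 ** i))
--     return res
-- ===== Notes on version B (the rewrite author's own statement) =====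
-- stated objective: alternative
-- what changed: Replaces string conversion and slicing with pure integer arithmetic: right-truncations by integer division with powers of ten, left-truncations by modulus with powers of ten, the digit count obtained by repeated division; no strings are built or parsed.
import Mathlib
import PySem

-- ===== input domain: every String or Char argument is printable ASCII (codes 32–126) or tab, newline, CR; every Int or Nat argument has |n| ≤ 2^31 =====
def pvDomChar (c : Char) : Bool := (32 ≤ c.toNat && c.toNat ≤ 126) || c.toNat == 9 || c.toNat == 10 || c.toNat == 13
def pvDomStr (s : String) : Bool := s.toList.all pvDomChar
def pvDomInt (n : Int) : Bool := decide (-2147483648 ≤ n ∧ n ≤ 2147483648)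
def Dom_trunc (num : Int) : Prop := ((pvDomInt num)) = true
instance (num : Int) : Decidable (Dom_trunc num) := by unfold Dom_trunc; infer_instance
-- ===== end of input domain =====

-- B replaces A's string conversion/slicing by pure integer arithmetic (integer division and
-- modulus by powers of ten, the digit count obtained by repeated division); same result set.

-- ===== PORT A =====
-- int() as A applies it: under Pre_trunc every slice int() sees is a nonempty string of
-- ASCII decimal digits, on which Python's int(s) is exactly this fold (ported by hand,
-- exact on that shape; negative num, where int() would see '-' and raise, is outside Pre_).
def pvParseDigits (t : String) : Int :=
  ((t.toList.foldl (fun a c => a * 10 + (c.toNat - 48)) 0 : Nat) : Int)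

def trunc (num : Int) : List Int :=
  let s := PySem.Int.toStr num
  let n : Int := PySem.Str.len s
  let list0 : List String := (PySem.List.pyRange 0 n 1).foldl
      (fun acc i => acc ++ [PySem.Str.slice s none (some (n - i)), PySem.Str.slice s (some i) (some n)]) []
  let list1 := list0.map pvParseDigits
  PySem.Set.ofList list1

-- ===== PORT B =====
-- the 'while t >= 10: t //= 10; L += 1' digit counter of Source B
def pvNumDigits (t : Int) : Int :=
  if 10 ≤ t then pvNumDigits (PySem.Int.floordiv t 10) + 1 else 1
termination_by t.toNat
decreasing_by
  rw [PySem.Int.floordiv_eq_ediv_of_pos (by norm_num : (0:Int) < 10)]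
  omega

def trunc_alt (num : Int) : List Int :=
  let L := pvNumDigits num
  let p : Int := 10 ^ L.toNat          -- Python's power with exponent L, which is ≥ 1 hence nonnegative
  (PySem.List.pyRange 0 L 1).foldl
    (fun res i =>
      PySem.Set.add (PySem.Set.add res (PySem.Int.floordiv num (10 ^ i.toNat)))
        (PySem.Int.mod num (PySem.Int.floordiv p (10 ^ i.toNat))))
    PySem.Set.empty

-- ===== PRECONDITION & SPEC =====
-- Pre_ excludes negative num, on which A raises ValueError (int('-') on the sign slice).
def Pre_trunc (num : Int) : Prop := 0 ≤ num
instance (num : Int) : Decidable (Pre_trunc num) := by unfold Pre_trunc; infer_instance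
def pvWitness_trunc : Int := 3797

def Spec_trunc (num : Int) (out : List Int) : Prop := out = trunc_alt num
instance (num : Int) (out : List Int) : Decidable (Spec_trunc num out) := by unfold Spec_trunc; infer_instance

-- ===== CLAIM (what is proved, stated in full; the proofs are below) =====
def Claim_equal_trunc : Prop := ∀ (num : Int), Dom_trunc num → Pre_trunc num → Spec_trunc num (trunc num)

-- ===== LEMMAS AND PROOFS =====

-- value of a big-endian digit-character list, as pvParseDigits computes it
def pvVal (ds : List Char) : Nat := ds.foldl (fun a c => a * 10 + (c.toNat - 48)) 0

lemma pv_parse_eq (t : String) : pvParseDigits t = ((pvVal t.toList : Nat) : Int) := rfl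

-- toDigitsCore: pulling the accumulator out
lemma pv_tdc_acc : ∀ (f n : Nat) (l : List Char), n < f →
    Nat.toDigitsCore 10 f n l = Nat.toDigitsCore 10 f n [] ++ l := by
  intro f
  induction f with
  | zero => intro n l h; omega
  | succ f ih =>
    intro n l h
    simp only [Nat.toDigitsCore]
    by_cases h10 : n / 10 = 0
    · simp [h10]
    · simp only [h10, if_false]
      have hlt : n / 10 < f := by omega
      rw [ih (n/10) ((n % 10).digitChar :: l) hlt, ih (n/10) [(n % 10).digitChar] hlt]
      simp

-- toDigitsCore: fuel irrelevance
lemma pv_tdc_fuel : ∀ (n f f' : Nat), n < f → n < f' →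
    Nat.toDigitsCore 10 f n [] = Nat.toDigitsCore 10 f' n [] := by
  intro n
  induction n using Nat.strong_induction_on with
  | _ n ih =>
    intro f f' hf hf'
    obtain ⟨g, rfl⟩ : ∃ g, f = g + 1 := ⟨f - 1, by omega⟩
    obtain ⟨g', rfl⟩ : ∃ g', f' = g' + 1 := ⟨f' - 1, by omega⟩
    simp only [Nat.toDigitsCore]
    by_cases h10 : n / 10 = 0
    · simp [h10]
    · simp only [h10, if_false]
      have hlt : n / 10 < n := by omega
      rw [pv_tdc_acc g (n/10) _ (by omega), pv_tdc_acc g' (n/10) _ (by omega),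
        ih (n/10) hlt g g' (by omega) (by omega)]

lemma pv_toDigits_eq_tdc {f n : Nat} (h : n < f) :
    Nat.toDigits 10 n = Nat.toDigitsCore 10 f n [] := by
  rw [Nat.toDigits]; exact pv_tdc_fuel n (n+1) f (by omega) h

lemma pv_toDigits_small {n : Nat} (h : n < 10) : Nat.toDigits 10 n = [Nat.digitChar n] := by
  simp [Nat.toDigits, Nat.toDigitsCore, Nat.div_eq_of_lt h, Nat.mod_eq_of_lt h]

lemma pv_toDigits_step {n : Nat} (h : 10 ≤ n) :
    Nat.toDigits 10 n = Nat.toDigits 10 (n / 10) ++ [Nat.digitChar (n % 10)] := by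
  have h10 : n / 10 ≠ 0 := by omega
  rw [Nat.toDigits]
  conv_lhs => rw [Nat.toDigitsCore.eq_def]
  simp only [h10, if_false]
  rw [pv_tdc_acc n (n/10) _ (by omega), ← pv_toDigits_eq_tdc (by omega : n/10 < n)]

lemma pv_digitChar_toNat {d : Nat} (h : d < 10) : (Nat.digitChar d).toNat - 48 = d := by
  interval_cases d <;> rfl

lemma pv_val_append (ds : List Char) (c : Char) :
    pvVal (ds ++ [c]) = pvVal ds * 10 + (c.toNat - 48) := by
  simp [pvVal, List.foldl_append]

lemma pv_val_toDigits : ∀ n : Nat, pvVal (Nat.toDigits 10 n) = n := by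
  intro n
  induction n using Nat.strong_induction_on with
  | _ n ih =>
    by_cases h : n < 10
    · simp [pv_toDigits_small h, pvVal, pv_digitChar_toNat h]
    · rw [pv_toDigits_step (by omega), pv_val_append, ih (n/10) (by omega),
        pv_digitChar_toNat (by omega)]
      omega

lemma pv_numDigits_natCast : ∀ n : Nat, pvNumDigits (n : Int) = ((Nat.toDigits 10 n).length : Int) := by
  intro n
  induction n using Nat.strong_induction_on with
  | _ n ih =>
    rw [pvNumDigits]
    by_cases h : (10:Int) ≤ (n:Int)
    · have hn : 10 ≤ n := by exact_mod_cast h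
      rw [if_pos h]
      have hfd : PySem.Int.floordiv (n:Int) 10 = ((n / 10 : Nat) : Int) := by
        exact_mod_cast PySem.Int.floordiv_natCast n 10
      rw [hfd, ih (n/10) (by omega), pv_toDigits_step hn]
      simp
    · have hn : n < 10 := by exact_mod_cast not_le.mp (fun hc => h (by exact_mod_cast hc))
      rw [if_neg h, pv_toDigits_small hn]
      simp

lemma pv_mod_pow_succ (n k : Nat) : n % 10 ^ (k + 1) = (n / 10 % 10 ^ k) * 10 + n % 10 := by
  have hm : 0 < 10 ^ k := Nat.pow_pos (by omega)
  set m := 10 ^ k with hmdef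
  have hb : n / 10 % m < m := Nat.mod_lt _ hm
  have h2 : n = (n/10/m) * m * 10 + ((n/10 % m) * 10 + n % 10) := by
    have e1 := Nat.div_add_mod (n/10) m
    have e2 := Nat.div_add_mod n 10
    zify at e1 e2 ⊢
    linear_combination (-10) * e1 - e2
  rw [pow_succ, ← hmdef]
  conv_lhs => rw [h2]
  have h3 : (n/10/m) * m * 10 = (m * 10) * (n/10/m) := by ring
  rw [h3, Nat.mul_add_mod]
  exact Nat.mod_eq_of_lt (by omega)

lemma pv_take_toDigits : ∀ (i n : Nat), i < (Nat.toDigits 10 n).length →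
    (Nat.toDigits 10 n).take ((Nat.toDigits 10 n).length - i) = Nat.toDigits 10 (n / 10 ^ i) := by
  intro i
  induction i with
  | zero => intro n _; simp
  | succ i ih =>
    intro n hi
    have hn : 10 ≤ n := by
      by_contra h
      rw [pv_toDigits_small (by omega)] at hi
      simp at hi
    rw [pv_toDigits_step hn] at hi ⊢
    simp only [List.length_append, List.length_cons, List.length_nil] at hi ⊢
    have hle : (Nat.toDigits 10 (n/10)).length + 1 - (i+1) ≤ (Nat.toDigits 10 (n/10)).length := by omega
    rw [List.take_append_of_le_length hle]
    have : (Nat.toDigits 10 (n/10)).length + 1 - (i+1) = (Nat.toDigits 10 (n/10)).length - i := by omega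
    rw [this, ih (n/10) (by omega), Nat.div_div_eq_div_mul, ← pow_succ']

lemma pv_val_drop : ∀ (n i : Nat), i < (Nat.toDigits 10 n).length →
    pvVal ((Nat.toDigits 10 n).drop i) = n % 10 ^ ((Nat.toDigits 10 n).length - i) := by
  intro n
  induction n using Nat.strong_induction_on with
  | _ n ih =>
    intro i hi
    by_cases h : n < 10
    · rw [pv_toDigits_small h] at hi ⊢
      simp at hi
      subst hi
      simp [pvVal, pv_digitChar_toNat h, Nat.mod_eq_of_lt h]
    · rw [pv_toDigits_step (by omega)] at hi ⊢
      simp only [List.length_append, List.length_cons, List.length_nil] at hi ⊢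
      have hle : i ≤ (Nat.toDigits 10 (n/10)).length := by omega
      rw [List.drop_append_of_le_length hle]
      by_cases heq : i = (Nat.toDigits 10 (n/10)).length
      · subst heq
        simp [pvVal, pv_digitChar_toNat (by omega : n % 10 < 10)]
      · rw [pv_val_append, ih (n/10) (by omega) i (by omega),
          pv_digitChar_toNat (by omega : n % 10 < 10)]
        have h2 : (Nat.toDigits 10 (n/10)).length + 1 - i
            = ((Nat.toDigits 10 (n/10)).length - i) + 1 := by omega
        rw [h2, pv_mod_pow_succ]

lemma pv_foldl_add_pairs (x y : Int → Int) : ∀ (l : List Int) (s : PySem.Set Int),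
    List.foldl PySem.Set.add s (l.flatMap (fun i => [x i, y i])) =
      l.foldl (fun r i => PySem.Set.add (PySem.Set.add r (x i)) (y i)) s := by
  intro l
  induction l with
  | nil => intro s; rfl
  | cons a t ih => intro s; simp [List.flatMap_cons, List.foldl, ih]

-- ===== VERDICT (by name: the statement is the Claim_ definition above) =====
theorem trunc_spec : Claim_equal_trunc := by
  unfold Claim_equal_trunc Spec_trunc Pre_trunc
  intro num _ hnn
  obtain ⟨n, rfl⟩ : ∃ n : Nat, num = (n : Int) := ⟨num.toNat, by omega⟩
  have hs : (PySem.Int.toStr (n:Int)).toList = Nat.toDigits 10 n := by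
    rw [PySem.Int.toList_toStr]
    simp [PySem.Int.toChars, Int.not_lt.mpr (Int.natCast_nonneg n)]
  have hlen : PySem.Str.len (PySem.Int.toStr (n:Int)) = ((Nat.toDigits 10 n).length : Int) := by
    rw [PySem.Str.len_eq, hs]
  simp only [trunc, trunc_alt]
  rw [hlen, pv_numDigits_natCast n]
  rw [PySem.List.foldl_append_eq_flatMap, List.nil_append, PySem.Set.ofList_eq_foldl,
    List.map_flatMap]
  simp only [List.map_cons, List.map_nil]
  rw [pv_foldl_add_pairs, PySem.Set.empty_eq]
  apply PySem.List.foldl_congr_mem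
  intro acc i hi
  rw [PySem.List.mem_pyRange_one] at hi
  obtain ⟨i', rfl⟩ : ∃ i' : Nat, i = (i' : Int) := ⟨i.toNat, by omega⟩
  have hilt : i' < (Nat.toDigits 10 n).length := by exact_mod_cast hi.2
  have hpow : ((10:Int) ^ ((i':Int)).toNat) = ((10 ^ i' : Nat) : Int) := by
    push_cast [Int.toNat_natCast]
    rfl
  congr 1
  · -- prefix truncation: int(num_str[:L-i]) = num // 10**i
    congr 1
    rw [pv_parse_eq, PySem.Str.toList_slice, PySem.Chars.slice_eq_listSlice, hs]
    have hsub : ((Nat.toDigits 10 n).length : Int) - (i' : Int)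
        = (((Nat.toDigits 10 n).length - i' : Nat) : Int) := by omega
    rw [hsub, PySem.List.slice_to _ (by positivity), Int.toNat_natCast,
      pv_take_toDigits i' n hilt, pv_val_toDigits]
    rw [hpow]
    exact_mod_cast (PySem.Int.floordiv_natCast n (10 ^ i')).symm
  · -- suffix truncation: int(num_str[i:]) = num % 10**(L-i)
    rw [pv_parse_eq, PySem.Str.toList_slice, PySem.Chars.slice_eq_listSlice, hs,
      PySem.List.slice_natCast, List.take_of_length_le (by simp), pv_val_drop n i' hilt]
    rw [hpow]
    have hp : ((10:Int) ^ (((Nat.toDigits 10 n).length : Int)).toNat)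
        = ((10 ^ (Nat.toDigits 10 n).length : Nat) : Int) := by
      push_cast [Int.toNat_natCast]
      rfl
    rw [hp]
    have hfd : PySem.Int.floordiv ((10 ^ (Nat.toDigits 10 n).length : Nat) : Int)
        ((10 ^ i' : Nat) : Int) = ((10 ^ ((Nat.toDigits 10 n).length - i') : Nat) : Int) := by
      rw [PySem.Int.floordiv_natCast, Nat.pow_div (by omega) (by omega)]
    rw [hfd]
    exact_mod_cast (PySem.Int.mod_natCast n (10 ^ ((Nat.toDigits 10 n).length - i'))).symm
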